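-- pv_equiv track=rewrite | github.com/coultat/hechapyre | add_adform/get_placements_setups.py | post_bid
-- ===== SOURCE A (Python) =====
-- def post_bid(raw_setup, new_network = ''):
--     final_setup_beg = []
--     network_setup = []
--     possible_networks = ['adf', 'adt', 'nxs', 'nxs2', 'rbhb', 'cthb', 'pp2hb', 'pphb', 'pp3hb', 'ss', 'tl', 'pbhb',
--                          'ox2', 'ox', 'sahb', 'ot', 'svhb', 'dm', 'iehb']
--     final_setup_beg.extend([result + '>' for result in raw_setup if 'adx1' == result.lower()])
--     final_setup_beg.extend([result + '>' for result in raw_setup if 'adx1a' == result.lower()])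
--     final_setup_beg.extend([result + ',' for result in raw_setup if 'ct' == result.lower()])
--     final_setup_beg.extend([result + ',' for result in raw_setup if 'rb' == result.lower()])
--     helper = [1 for result in raw_setup if result.lower() in possible_networks]
--     if helper != []:
--         final_setup_beg.extend('[')
--         network_setup = ",".join([result for result in raw_setup if result.lower() in possible_networks])
--         final_setup_beg.extend([new_network, network_setup, ']', '>'])
--     final_setup_beg.extend([result + '>' for result in raw_setup if 'adx1b' == result.lower()])
--     final_setup_beg.extend([result for result in raw_setup if 'dc1' == result.lower() or 'pb' == result.lower()])
--     final_setup_beg = "".join(final_setup_beg)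
--     return final_setup_beg
-- ===== SOURCE B (Python) =====
-- def post_bid(raw_setup, new_network=''):
--     NETS = {'adf', 'adt', 'nxs', 'nxs2', 'rbhb', 'cthb', 'pp2hb', 'pphb', 'pp3hb', 'ss', 'tl',
--             'pbhb', 'ox2', 'ox', 'sahb', 'ot', 'svhb', 'dm', 'iehb'}
--     adx1 = []; adx1a = []; ct = []; rb = []; nets = []; adx1b = []; tail = []
--     for r in raw_setup:
--         low = r.lower()
--         if low == 'adx1':
--             adx1.append(r + '>')
--         elif low == 'adx1a':
--             adx1a.append(r + '>')
--         elif low == 'ct':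
--             ct.append(r + ',')
--         elif low == 'rb':
--             rb.append(r + ',')
--         elif low in NETS:
--             nets.append(r)
--         elif low == 'adx1b':
--             adx1b.append(r + '>')
--         elif low == 'dc1' or low == 'pb':
--             tail.append(r)
--     parts = adx1 + adx1a + ct + rb
--     if nets:
--         parts += ['[', new_network, ','.join(nets), ']', '>']
--     parts += adx1b + tail
--     return ''.join(parts)
-- ===== Notes on version B (the rewrite author's own statement) =====
-- stated objective: simpler
-- what changed: Replaces seven independent filtering passes over raw_setup (plus a throwaway helper list built only to test network presence) with a single pass that buckets each suffixed token by its lowercased category, then concatenates the buckets in the fixed output order.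
import Mathlib
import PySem

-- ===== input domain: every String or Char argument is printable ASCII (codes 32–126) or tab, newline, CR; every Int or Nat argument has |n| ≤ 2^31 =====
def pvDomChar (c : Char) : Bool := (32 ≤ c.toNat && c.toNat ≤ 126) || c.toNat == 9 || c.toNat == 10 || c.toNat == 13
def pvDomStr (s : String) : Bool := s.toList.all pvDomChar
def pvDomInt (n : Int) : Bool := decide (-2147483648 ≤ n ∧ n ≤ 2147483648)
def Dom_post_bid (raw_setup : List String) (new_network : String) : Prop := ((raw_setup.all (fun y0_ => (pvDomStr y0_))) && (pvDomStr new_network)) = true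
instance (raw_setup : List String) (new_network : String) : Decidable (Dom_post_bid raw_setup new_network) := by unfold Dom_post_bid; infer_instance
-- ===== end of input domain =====

-- B replaces A's seven independent filtering passes over raw_setup by one bucketing pass; objective: simpler.

-- ===== PORT A =====
def pvNetworks : List String :=
  ["adf", "adt", "nxs", "nxs2", "rbhb", "cthb", "pp2hb", "pphb", "pp3hb", "ss", "tl", "pbhb",
   "ox2", "ox", "sahb", "ot", "svhb", "dm", "iehb"]

def post_bid (raw_setup : List String) (new_network : String) : String :=
  let possible_networks := pvNetworks
  let beg1 := (raw_setup.filter (fun result => "adx1" == PySem.Str.lower result)).map (fun result => result ++ ">")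
  let beg2 := beg1 ++ (raw_setup.filter (fun result => "adx1a" == PySem.Str.lower result)).map (fun result => result ++ ">")
  let beg3 := beg2 ++ (raw_setup.filter (fun result => "ct" == PySem.Str.lower result)).map (fun result => result ++ ",")
  let beg4 := beg3 ++ (raw_setup.filter (fun result => "rb" == PySem.Str.lower result)).map (fun result => result ++ ",")
  let helper : List Int := (raw_setup.filter (fun result => possible_networks.contains (PySem.Str.lower result))).map (fun _ => 1)
  let beg5 :=
    if helper ≠ [] then
      let network_setup := String.intercalate "," (raw_setup.filter (fun result => possible_networks.contains (PySem.Str.lower result)))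
      beg4 ++ ["["] ++ [new_network, network_setup, "]", ">"]
    else beg4
  let beg6 := beg5 ++ (raw_setup.filter (fun result => "adx1b" == PySem.Str.lower result)).map (fun result => result ++ ">")
  let beg7 := beg6 ++ raw_setup.filter (fun result => "dc1" == PySem.Str.lower result || "pb" == PySem.Str.lower result)
  String.join beg7

-- ===== PORT B =====
-- bucket state: (adx1, adx1a, ct, rb, nets, adx1b, tail)
def pbBuckets :=
  List String × List String × List String × List String × List String × List String × List String

def pbStep (acc : pbBuckets) (r : String) : pbBuckets :=
  let low := PySem.Str.lower r
  if low == "adx1" then (acc.1 ++ [r ++ ">"], acc.2.1, acc.2.2.1, acc.2.2.2.1, acc.2.2.2.2.1, acc.2.2.2.2.2.1, acc.2.2.2.2.2.2)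
  else if low == "adx1a" then (acc.1, acc.2.1 ++ [r ++ ">"], acc.2.2.1, acc.2.2.2.1, acc.2.2.2.2.1, acc.2.2.2.2.2.1, acc.2.2.2.2.2.2)
  else if low == "ct" then (acc.1, acc.2.1, acc.2.2.1 ++ [r ++ ","], acc.2.2.2.1, acc.2.2.2.2.1, acc.2.2.2.2.2.1, acc.2.2.2.2.2.2)
  else if low == "rb" then (acc.1, acc.2.1, acc.2.2.1, acc.2.2.2.1 ++ [r ++ ","], acc.2.2.2.2.1, acc.2.2.2.2.2.1, acc.2.2.2.2.2.2)
  else if pvNetworks.contains low then (acc.1, acc.2.1, acc.2.2.1, acc.2.2.2.1, acc.2.2.2.2.1 ++ [r], acc.2.2.2.2.2.1, acc.2.2.2.2.2.2)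
  else if low == "adx1b" then (acc.1, acc.2.1, acc.2.2.1, acc.2.2.2.1, acc.2.2.2.2.1, acc.2.2.2.2.2.1 ++ [r ++ ">"], acc.2.2.2.2.2.2)
  else if low == "dc1" || low == "pb" then (acc.1, acc.2.1, acc.2.2.1, acc.2.2.2.1, acc.2.2.2.2.1, acc.2.2.2.2.2.1, acc.2.2.2.2.2.2 ++ [r])
  else acc

def post_bid_alt (raw_setup : List String) (new_network : String) : String :=
  let b : pbBuckets := raw_setup.foldl pbStep ([], [], [], [], [], [], [])
  let parts := b.1 ++ b.2.1 ++ b.2.2.1 ++ b.2.2.2.1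
  let parts := if b.2.2.2.2.1 ≠ [] then parts ++ ["[", new_network, String.intercalate "," b.2.2.2.2.1, "]", ">"] else parts
  let parts := parts ++ b.2.2.2.2.2.1 ++ b.2.2.2.2.2.2
  String.join parts

-- ===== PRECONDITION & SPEC =====
def Spec_post_bid (raw_setup : List String) (new_network : String) (out : String) : Prop := out = post_bid_alt raw_setup new_network
instance (raw_setup : List String) (new_network : String) (out : String) : Decidable (Spec_post_bid raw_setup new_network out) := by unfold Spec_post_bid; infer_instance

-- ===== CLAIM (what is proved, stated in full; the proofs are below) =====
def Claim_equal_post_bid : Prop := ∀ (raw_setup : List String) (new_network : String), Dom_post_bid raw_setup new_network → Spec_post_bid raw_setup new_network (post_bid raw_setup new_network)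

-- ===== LEMMAS AND PROOFS =====

lemma pbBuckets_spec (l : List String) (a1 a2 a3 a4 a5 a6 a7 : List String) :
    l.foldl pbStep (a1, a2, a3, a4, a5, a6, a7) =
      (a1 ++ (l.filter (fun r => "adx1" == PySem.Str.lower r)).map (fun r => r ++ ">"),
       a2 ++ (l.filter (fun r => "adx1a" == PySem.Str.lower r)).map (fun r => r ++ ">"),
       a3 ++ (l.filter (fun r => "ct" == PySem.Str.lower r)).map (fun r => r ++ ","),
       a4 ++ (l.filter (fun r => "rb" == PySem.Str.lower r)).map (fun r => r ++ ","),
       a5 ++ l.filter (fun r => pvNetworks.contains (PySem.Str.lower r)),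
       a6 ++ (l.filter (fun r => "adx1b" == PySem.Str.lower r)).map (fun r => r ++ ">"),
       a7 ++ l.filter (fun r => "dc1" == PySem.Str.lower r || "pb" == PySem.Str.lower r)) := by
  induction l generalizing a1 a2 a3 a4 a5 a6 a7 with
  | nil => simp
  | cons r l ih =>
      simp only [List.foldl_cons]
      by_cases h1 : PySem.Str.lower r = "adx1"
      · simp [pbStep, h1, ih, pvNetworks, List.append_assoc]
      by_cases h2 : PySem.Str.lower r = "adx1a"
      · simp [pbStep, h2, ih, pvNetworks, List.append_assoc]
      by_cases h3 : PySem.Str.lower r = "ct"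
      · simp [pbStep, h3, ih, pvNetworks, List.append_assoc]
      by_cases h4 : PySem.Str.lower r = "rb"
      · simp [pbStep, h4, ih, pvNetworks, List.append_assoc]
      by_cases h5 : PySem.Str.lower r ∈ pvNetworks
      · have e6 : PySem.Str.lower r ≠ "adx1b" := fun e => by rw [e] at h5; exact absurd h5 (by decide)
        have e7 : PySem.Str.lower r ≠ "dc1" := fun e => by rw [e] at h5; exact absurd h5 (by decide)
        have e8 : PySem.Str.lower r ≠ "pb" := fun e => by rw [e] at h5; exact absurd h5 (by decide)
        simp [pbStep, h1, h2, h3, h4, h5,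
              Ne.symm h1, Ne.symm h2, Ne.symm h3, Ne.symm h4, Ne.symm e6, Ne.symm e7, Ne.symm e8,
              ih, List.append_assoc]
      by_cases h6 : PySem.Str.lower r = "adx1b"
      · simp [pbStep, h6, ih, pvNetworks, List.append_assoc]
      by_cases h7 : PySem.Str.lower r = "dc1"
      · simp [pbStep, h7, ih, pvNetworks, List.append_assoc]
      by_cases h8 : PySem.Str.lower r = "pb"
      · simp [pbStep, h8, ih, pvNetworks, List.append_assoc]
      · simp [pbStep, h1, h2, h3, h4, h5, h6, h7, h8,
              Ne.symm h1, Ne.symm h2, Ne.symm h3, Ne.symm h4, Ne.symm h6, Ne.symm h7, Ne.symm h8,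
              ih]

-- ===== VERDICT (by name: the statement is the Claim_ definition above) =====
theorem post_bid_spec : Claim_equal_post_bid := by
  intro raw_setup new_network _
  unfold Spec_post_bid post_bid post_bid_alt
  rw [pbBuckets_spec]
  simp only [List.nil_append, List.map_eq_nil_iff, ne_eq]
  split_ifs <;> simp_all [List.append_assoc]
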